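-- pv_equiv track=rewrite | github.com/MrBrantCode/unitest_baseline | mut_generate/mist_train_cf/cf_124/solution.py | get_sorted_unique_even_numbers
-- ===== SOURCE A (Python) =====
-- def get_sorted_unique_even_numbers(arr):
--     if len(arr) == 0:
--         return []
--
--     count = 0
--     for num in arr:
--         if num % 2 == 0:
--             count += 1
--
--     result = [0] * count
--     index = 0
--     for num in arr:
--         if num % 2 == 0:
--             result[index] = num
--             index += 1
--
--     # Bubble Sort
--     for i in range(len(result)):
--         for j in range(len(result) - 1 - i):
--             if result[j] > result[j+1]:
--                 result[j], result[j+1] = result[j+1], result[j]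
--
--     # Remove duplicates
--     i = 0
--     while i < len(result) - 1:
--         if result[i] == result[i+1]:
--             result.pop(i+1)
--         else:
--             i += 1
--
--     return result
-- ===== SOURCE B (Python) =====
-- def _insert_unique(lst, num):
--     """Insert num into the sorted duplicate-free list lst; return lst itself if num is present."""
--     lo, hi = 0, len(lst)
--     while lo < hi:
--         mid = (lo + hi) // 2
--         if lst[mid] < num:
--             lo = mid + 1
--         else:
--             hi = mid
--     if lo < len(lst) and lst[lo] == num:
--         return lst
--     return lst[:lo] + [num] + lst[lo:]
--
--
-- def get_sorted_unique_even_numbers(arr):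
--     result = []
--     for num in arr:
--         if num % 2 == 0:
--             result = _insert_unique(result, num)
--     return result
-- ===== Notes on version B (the rewrite author's own statement) =====
-- stated objective: faster
-- what changed: Replaces A's three-phase pipeline (count-and-fill an array of evens, bubble-sort it in O(k^2), then pop adjacent duplicates in a while-loop) with a single pass over arr that keeps the result sorted and duplicate-free, locating each even number's insertion point by a hand-written binary search.
import Mathlib
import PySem

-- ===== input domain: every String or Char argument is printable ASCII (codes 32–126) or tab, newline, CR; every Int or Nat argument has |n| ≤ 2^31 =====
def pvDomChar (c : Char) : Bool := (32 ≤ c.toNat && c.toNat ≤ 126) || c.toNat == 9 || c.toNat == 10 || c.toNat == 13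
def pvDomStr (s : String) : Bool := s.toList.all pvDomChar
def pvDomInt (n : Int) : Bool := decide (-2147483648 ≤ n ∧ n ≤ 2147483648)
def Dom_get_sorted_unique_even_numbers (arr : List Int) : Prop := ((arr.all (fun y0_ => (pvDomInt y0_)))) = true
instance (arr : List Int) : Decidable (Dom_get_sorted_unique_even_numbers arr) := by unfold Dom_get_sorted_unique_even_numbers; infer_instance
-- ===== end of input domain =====

-- B replaces A's collect + bubble-sort + adjacent-pop pipeline by a single pass that keeps
-- the result sorted and duplicate-free, inserting via binary search (objective: faster,
-- measured).


-- ===== PORT A =====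
-- inner bubble pass: `for j in range(len(result) - 1 - i): if result[j] > result[j+1]: swap`
-- (j and j+1 are always in range here, so Python's result[j] is pyGetD / pySetD exactly)
-- body of the inner loop: `if result[j] > result[j+1]: result[j], result[j+1] = result[j+1], result[j]`
def bubbleStep (r : List Int) (j : Int) : List Int :=
  let a := PySem.List.pyGetD r j 0
  let b := PySem.List.pyGetD r (j + 1) 0
  if a > b then PySem.List.pySetD (PySem.List.pySetD r j b) (j + 1) a else r

def bubbleInner (r : List Int) (i : Int) : List Int :=
  (PySem.List.pyRange 0 (PySem.List.len r - 1 - i) 1).foldl bubbleStep r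

-- `i = 0; while i < len(result) - 1: if result[i] == result[i+1]: result.pop(i+1) else: i += 1`
-- (i ≥ 0 always; pop happens at index i+1 which is in range, so pop(i+1) = eraseIdx (i+1) exactly)
def dedupLoop (r : List Int) (i : Nat) : List Int :=
  if _h : (i : Int) < PySem.List.len r - 1 then
    if PySem.List.pyGetD r (i : Int) 0 = PySem.List.pyGetD r ((i : Int) + 1) 0 then
      dedupLoop (r.eraseIdx (i + 1)) i
    else
      dedupLoop r (i + 1)
  else r
termination_by r.length - i
decreasing_by
  · simp only [PySem.List.len_eq] at _h
    rw [List.length_eraseIdx]; split <;> omega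
  · simp only [PySem.List.len_eq] at _h; omega

def get_sorted_unique_even_numbers (arr : List Int) : List Int :=
  if PySem.List.len arr = 0 then []
  else
    -- count = 0; for num in arr: if num % 2 == 0: count += 1
    let count : Int := arr.foldl (fun c num => if PySem.Int.mod num 2 = 0 then c + 1 else c) 0
    -- result = [0] * count  (count ≥ 0, so toNat is exact); index fill loop
    let fill := arr.foldl
      (fun (s : List Int × Int) num =>
        if PySem.Int.mod num 2 = 0 then (PySem.List.pySetD s.1 s.2 num, s.2 + 1) else s)
      (List.replicate count.toNat 0, 0)
    -- bubble sort: for i in range(len(result)): inner pass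
    let sorted := (PySem.List.pyRange 0 (PySem.List.len fill.1) 1).foldl bubbleInner fill.1
    dedupLoop sorted 0

-- ===== PORT B =====
-- `lo, hi = 0, len(lst); while lo < hi: mid = (lo+hi)//2; ...` — lo, hi, mid stay in
-- [0, len(lst)] throughout, so Nat arithmetic ((lo+hi)/2 = (lo+hi)//2) and lst[mid] = getD
-- are exact here
def bisectLoop (lst : List Int) (num : Int) (lo hi : Nat) : Nat :=
  if lo < hi then
    let mid := (lo + hi) / 2
    if lst.getD mid 0 < num then bisectLoop lst num (mid + 1) hi
    else bisectLoop lst num lo mid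
  else lo
termination_by hi - lo
decreasing_by all_goals omega

-- `if lo < len(lst) and lst[lo] == num: return lst; return lst[:lo] + [num] + lst[lo:]`
-- (lo ≥ 0, so the slices are take/drop exactly)
def insertUnique (lst : List Int) (num : Int) : List Int :=
  let lo := bisectLoop lst num 0 lst.length
  if lo < lst.length ∧ lst.getD lo 0 = num then lst
  else lst.take lo ++ num :: lst.drop lo

def get_sorted_unique_even_numbers_alt (arr : List Int) : List Int :=
  arr.foldl (fun result num => if PySem.Int.mod num 2 = 0 then insertUnique result num else result) []

-- ===== PRECONDITION & SPEC =====
def Spec_get_sorted_unique_even_numbers (arr : List Int) (out : List Int) : Prop := out = get_sorted_unique_even_numbers_alt arr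
instance (arr : List Int) (out : List Int) : Decidable (Spec_get_sorted_unique_even_numbers arr out) := by unfold Spec_get_sorted_unique_even_numbers; infer_instance

-- ===== CLAIM (what is proved, stated in full; the proofs are below) =====
def Claim_equal_get_sorted_unique_even_numbers : Prop := ∀ (arr : List Int), Dom_get_sorted_unique_even_numbers arr → Spec_get_sorted_unique_even_numbers arr (get_sorted_unique_even_numbers arr)

-- ===== LEMMAS AND PROOFS =====

-- the even-number predicate both programs test
def evenp (n : Int) : Bool := PySem.Int.mod n 2 = 0

-- ---------- generic: two strictly sorted lists with the same members are equal ----------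
theorem strictSorted_eq : ∀ (l1 l2 : List Int), l1.Pairwise (· < ·) → l2.Pairwise (· < ·) →
    (∀ x, x ∈ l1 ↔ x ∈ l2) → l1 = l2 := by
  intro l1
  induction l1 with
  | nil =>
    intro l2 _ _ hm
    cases l2 with
    | nil => rfl
    | cons b t2 => exact absurd ((hm b).mpr List.mem_cons_self) (List.not_mem_nil)
  | cons a t1 ih =>
    intro l2 h1 h2 hm
    cases l2 with
    | nil => exact absurd ((hm a).mp List.mem_cons_self) (List.not_mem_nil)
    | cons b t2 =>
      have hab : a = b := by
        rcases List.mem_cons.mp ((hm a).mp List.mem_cons_self) with h | h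
        · exact h
        · rcases List.mem_cons.mp ((hm b).mpr List.mem_cons_self) with h' | h'
          · exact h'.symm
          · exact absurd ((List.pairwise_cons.mp h1).1 b h')
              (not_lt.mpr (le_of_lt ((List.pairwise_cons.mp h2).1 a h)))
      subst hab
      have ht : ∀ x, x ∈ t1 ↔ x ∈ t2 := by
        intro x
        constructor
        · intro hx
          rcases List.mem_cons.mp ((hm x).mp (List.mem_cons_of_mem _ hx)) with h | h
          · exact absurd h (by have := (List.pairwise_cons.mp h1).1 x hx; omega)
          · exact h
        · intro hx
          rcases List.mem_cons.mp ((hm x).mpr (List.mem_cons_of_mem _ hx)) with h | h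
          · exact absurd h (by have := (List.pairwise_cons.mp h2).1 x hx; omega)
          · exact h
      rw [ih t2 (List.pairwise_cons.mp h1).2 (List.pairwise_cons.mp h2).2 ht]

-- ---------- B side ----------
-- binary-search invariant: on a strictly sorted list the loop returns a split point r:
-- everything before r is < num, everything from r on is >= num
theorem bisectLoop_inv (lst : List Int) (num : Int) (hs : lst.Pairwise (· < ·)) :
    ∀ (lo hi : Nat), lo ≤ hi → hi ≤ lst.length →
    (∀ j (_ : j < lst.length), j < lo → lst[j] < num) →
    (∀ j (_ : j < lst.length), hi ≤ j → ¬ lst[j] < num) →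
    bisectLoop lst num lo hi ≤ lst.length ∧
    (∀ j (_ : j < lst.length), j < bisectLoop lst num lo hi → lst[j] < num) ∧
    (∀ j (_ : j < lst.length), bisectLoop lst num lo hi ≤ j → ¬ lst[j] < num) := by
  intro lo hi
  induction lo, hi using bisectLoop.induct lst num with
  | case1 lo hi hlt mid hmid ih =>
    intro hle hhi hlo' hhi'
    have hmeq : mid = (lo + hi) / 2 := rfl
    rw [hmeq] at hmid ih
    have hmlen : (lo + hi) / 2 < lst.length := by omega
    have hgetlt : lst[(lo + hi) / 2] < num := by
      rwa [List.getD_eq_getElem lst 0 hmlen] at hmid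
    rw [bisectLoop]
    simp only [if_pos hlt, if_pos hmid]
    apply ih (by omega) hhi ?_ hhi'
    intro j hj hjlt
    rcases Nat.lt_or_ge j ((lo + hi) / 2) with hc | hc
    · exact lt_trans (List.pairwise_iff_getElem.mp hs j _ hj hmlen hc) hgetlt
    · have : j = (lo + hi) / 2 := by omega
      subst this
      exact hgetlt
  | case2 lo hi hlt mid hmid ih =>
    intro hle hhi hlo' hhi'
    have hmeq : mid = (lo + hi) / 2 := rfl
    rw [hmeq] at hmid ih
    have hmlen : (lo + hi) / 2 < lst.length := by omega
    have hgetge : ¬ lst[(lo + hi) / 2] < num := by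
      rwa [List.getD_eq_getElem lst 0 hmlen] at hmid
    rw [bisectLoop]
    simp only [if_pos hlt, if_neg hmid]
    apply ih (by omega) (by omega) hlo' ?_
    intro j hj hjge
    rcases Nat.lt_or_ge ((lo + hi) / 2) j with hc | hc
    · have := List.pairwise_iff_getElem.mp hs _ j hmlen hj hc
      omega
    · have : j = (lo + hi) / 2 := by omega
      subst this
      exact hgetge
  | case3 lo hi hnlt =>
    intro hle hhi hlo' hhi'
    rw [bisectLoop, if_neg hnlt]
    exact ⟨by omega, hlo', fun j hj hjge => hhi' j hj (by omega)⟩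

theorem mem_insertUnique (l : List Int) (n x : Int) : x ∈ insertUnique l n ↔ x = n ∨ x ∈ l := by
  unfold insertUnique
  dsimp only
  split_ifs with h1
  · obtain ⟨hlt, heq⟩ := h1
    rw [List.getD_eq_getElem l 0 hlt] at heq
    constructor
    · exact Or.inr
    · rintro (rfl | hx)
      · exact heq ▸ List.getElem_mem hlt
      · exact hx
  · rw [List.mem_append, List.mem_cons]
    constructor
    · rintro (hx | rfl | hx)
      · exact Or.inr (List.mem_of_mem_take hx)
      · exact Or.inl rfl
      · exact Or.inr (List.mem_of_mem_drop hx)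
    · rintro (rfl | hx)
      · exact Or.inr (Or.inl rfl)
      · rcases List.mem_append.mp ((List.take_append_drop (bisectLoop l n 0 l.length) l).symm ▸ hx) with h | h
        · exact Or.inl h
        · exact Or.inr (Or.inr h)

theorem pairwise_insertUnique (l : List Int) (n : Int) (h : l.Pairwise (· < ·)) :
    (insertUnique l n).Pairwise (· < ·) := by
  unfold insertUnique
  dsimp only
  split_ifs with h1
  · exact h
  · obtain ⟨hr, hlow, hhigh⟩ := bisectLoop_inv l n h 0 l.length (by omega) (le_refl _)
      (by omega) (by omega)
    set r := bisectLoop l n 0 l.length with hrdef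
    have hps : (l.take r ++ l.drop r).Pairwise (· < ·) := by
      rw [List.take_append_drop]; exact h
    obtain ⟨pP, pS, pc⟩ := List.pairwise_append.mp hps
    have hPmem : ∀ y ∈ l.take r, y < n := by
      intro y hy
      obtain ⟨j, hj, hyj⟩ := List.mem_iff_getElem.mp hy
      rw [List.length_take] at hj
      rw [List.getElem_take] at hyj
      exact hyj ▸ hlow j (by omega) (by omega)
    have hSmem : ∀ z ∈ l.drop r, n < z := by
      intro z hz
      obtain ⟨j, hj, hzj⟩ := List.mem_iff_getElem.mp hz
      rw [List.length_drop] at hj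
      rw [List.getElem_drop] at hzj
      have hrlen : r < l.length := by omega
      have hge : ¬ l[r + j] < n := hhigh (r + j) (by omega) (by omega)
      rcases Nat.eq_or_lt_of_le (Nat.le_add_right r j) with hc | hc
      · -- z = l[r]; the found-branch test failed, so l[r] ≠ n
        have hj0 : j = 0 := by omega
        subst hj0
        simp only [Nat.add_zero] at hzj hge
        have hne : l.getD r 0 ≠ n := fun hcontra => h1 ⟨hrlen, hcontra⟩
        rw [List.getD_eq_getElem l 0 hrlen] at hne
        rw [← hzj]
        omega
      · have hlt2 : l[r] < l[r + j] := List.pairwise_iff_getElem.mp h r (r + j) hrlen (by omega) hc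
        have hger : ¬ l[r] < n := hhigh r hrlen (le_refl _)
        omega
    refine List.pairwise_append.mpr ⟨pP, List.pairwise_cons.mpr ⟨fun z hz => hSmem z hz, pS⟩, ?_⟩
    intro y hy z hz
    rcases List.mem_cons.mp hz with rfl | hz
    · exact hPmem y hy
    · exact pc y hy z hz

theorem alt_foldl_spec : ∀ (l acc : List Int), acc.Pairwise (· < ·) →
    (l.foldl (fun result num => if PySem.Int.mod num 2 = 0 then insertUnique result num else result) acc).Pairwise (· < ·) ∧
    (∀ x, x ∈ l.foldl (fun result num => if PySem.Int.mod num 2 = 0 then insertUnique result num else result) acc ↔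
      x ∈ acc ∨ x ∈ l.filter evenp) := by
  intro l
  induction l with
  | nil => intro acc hacc; simpa using hacc
  | cons a t ih =>
    intro acc hacc
    simp only [List.foldl_cons, List.filter_cons]
    by_cases ha : PySem.Int.mod a 2 = 0
    · have he : evenp a = true := by simp only [evenp]; exact decide_eq_true ha
      rw [if_pos ha, he]
      obtain ⟨p1, p2⟩ := ih (insertUnique acc a) (pairwise_insertUnique acc a hacc)
      refine ⟨p1, fun x => ?_⟩
      rw [p2 x, mem_insertUnique]
      simp [List.mem_cons]
      tauto
    · have he : evenp a = false := by simp only [evenp]; exact decide_eq_false ha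
      rw [if_neg ha, he]; simp only [Bool.false_eq_true, if_false]
      obtain ⟨p1, p2⟩ := ih acc hacc
      exact ⟨p1, fun x => by rw [p2 x]⟩

theorem alt_spec (arr : List Int) :
    (get_sorted_unique_even_numbers_alt arr).Pairwise (· < ·) ∧
    (∀ x, x ∈ get_sorted_unique_even_numbers_alt arr ↔ x ∈ arr.filter evenp) := by
  obtain ⟨p1, p2⟩ := alt_foldl_spec arr [] (List.Pairwise.nil)
  exact ⟨p1, fun x => by rw [get_sorted_unique_even_numbers_alt, p2 x]; simp⟩

-- ---------- A side: fill phase produces the filtered list ----------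
theorem pySetD_natCast (xs : List Int) (n : Nat) (h : n < xs.length) (v : Int) :
    PySem.List.pySetD xs (n : Int) v = xs.set n v := by
  simp [PySem.List.pySetD, PySem.List.pySet?, PySem.List.pyIdx?, h]

theorem fill_spec : ∀ (l pre rest : List Int), rest.length = (l.filter evenp).length →
    (l.foldl (fun (s : List Int × Int) num =>
        if PySem.Int.mod num 2 = 0 then (PySem.List.pySetD s.1 s.2 num, s.2 + 1) else s)
      (pre ++ rest, (pre.length : Int))).1 = pre ++ l.filter evenp := by
  intro l
  induction l with
  | nil =>
    intro pre rest h
    simp only [List.filter_nil, List.length_nil] at h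
    simp [List.length_eq_zero_iff.mp h]
  | cons a l ih =>
    intro pre rest h
    by_cases ha : PySem.Int.mod a 2 = 0
    · have he : evenp a = true := by simp only [evenp]; exact decide_eq_true ha
      rw [List.filter_cons_of_pos he] at h ⊢
      cases rest with
      | nil => simp at h
      | cons r0 rtail =>
        simp only [List.foldl_cons, if_pos ha]
        have hset : PySem.List.pySetD (pre ++ r0 :: rtail) (pre.length : Int) a
            = pre ++ a :: rtail := by
          rw [pySetD_natCast _ _ (by simp) a,
            List.set_append_right pre.length a (le_refl _), Nat.sub_self, List.set_cons_zero]
        rw [hset]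
        have h2 : rtail.length = (l.filter evenp).length := by
          simpa using h
        have := ih (pre ++ [a]) rtail h2
        simp only [List.append_assoc, List.singleton_append, List.length_append,
          List.length_cons, List.length_nil] at this
        rw [← this]
        norm_num
    · have he : evenp a = false := by simp only [evenp]; exact decide_eq_false ha
      rw [List.filter_cons_of_neg (by simp [he])]
      simp only [List.foldl_cons, if_neg ha]
      exact ih pre rest (by rwa [List.filter_cons_of_neg (by simp [he])] at h)

-- ---------- A side: structural description of one bubble pass ----------
def bpass : List Int → Nat → List Int
  | l, 0 => l
  | [], _ + 1 => []
  | [a], _ + 1 => [a]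
  | a :: b :: t, m + 1 => if a > b then b :: bpass (a :: t) m else a :: bpass (b :: t) m

theorem bubbleStep_eq (l : List Int) (j : Nat) (h : j + 1 < l.length) :
    bubbleStep l (j : Int) =
      l.take j ++ (if l[j] > l[j + 1] then l[j + 1] :: l[j] :: l.drop (j + 2)
                   else l[j] :: l[j + 1] :: l.drop (j + 2)) := by
  have hj : j < l.length := by omega
  have hcast : (j : Int) + 1 = ((j + 1 : Nat) : Int) := by push_cast; ring
  have hga : PySem.List.pyGetD l (j : Int) 0 = l[j] := by
    rw [PySem.List.pyGetD_natCast, List.getD_eq_getElem l 0 hj]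
  have hgb : PySem.List.pyGetD l (((j + 1 : Nat)) : Int) 0 = l[j + 1] := by
    rw [PySem.List.pyGetD_natCast, List.getD_eq_getElem l 0 h]
  have hrec : l.take j ++ l[j] :: l[j + 1] :: l.drop (j + 2) = l := by
    rw [← List.drop_eq_getElem_cons h, ← List.drop_eq_getElem_cons hj, List.take_append_drop]
  unfold bubbleStep
  simp only [hcast, hga, hgb]
  split_ifs with hcmp
  · rw [pySetD_natCast _ _ hj, pySetD_natCast _ _ (by simpa using h),
      List.set_eq_take_cons_drop _ hj]
    have hlen : (l.take j).length = j := List.length_take_of_le (le_of_lt hj)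
    rw [List.set_append_right _ _ (by omega), hlen]
    have : j + 1 - j = 1 := by omega
    rw [this]
    have hdrop : l.drop (j + 1) = l[j + 1] :: l.drop (j + 2) := List.drop_eq_getElem_cons h
    rw [hdrop]
    rw [show l[j + 1] :: l[j] :: List.drop (j + 2) l
        = (l[j + 1] :: l[j + 1] :: List.drop (j + 2) l).set 1 l[j] by rfl]
  · exact hrec.symm

theorem inner_fold : ∀ (m j0 : Nat) (l : List Int), j0 + m < l.length →
    (PySem.List.pyRange (j0 : Int) ((j0 : Int) + (m : Int)) 1).foldl bubbleStep l
      = l.take j0 ++ bpass (l.drop j0) m := by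
  intro m
  induction m with
  | zero =>
    intro j0 l _
    rw [show ((j0 : Int) + ((0 : Nat) : Int)) = (j0 : Int) by push_cast; ring,
      PySem.List.pyRange_one_eq_nil (le_refl _), List.foldl_nil]
    show l = l.take j0 ++ bpass (l.drop j0) 0
    rw [show bpass (l.drop j0) 0 = l.drop j0 from rfl, List.take_append_drop]
  | succ m ih =>
    intro j0 l h
    have hj1 : j0 + 1 < l.length := by omega
    have hj0 : j0 < l.length := by omega
    rw [PySem.List.pyRange_one_cons (by push_cast; omega), List.foldl_cons, bubbleStep_eq l j0 hj1]
    have hdj : l.drop j0 = l[j0] :: l[j0 + 1] :: l.drop (j0 + 2) := by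
      rw [← List.drop_eq_getElem_cons hj1, ← List.drop_eq_getElem_cons hj0]
    have hcast : (j0 : Int) + 1 = ((j0 + 1 : Nat) : Int) := by push_cast; ring
    have hcast2 : (j0 : Int) + ((m + 1 : Nat) : Int) = ((j0 + 1 : Nat) : Int) + (m : Nat) := by
      push_cast; ring
    have hulen : (l.take j0).length = j0 := List.length_take_of_le (le_of_lt hj0)
    have hlen' : ∀ x y : Int, (l.take j0 ++ x :: y :: l.drop (j0 + 2)).length = l.length := by
      intro x y
      simp only [List.length_append, List.length_cons, List.length_drop, hulen]; omega
    have htake : ∀ x y : Int, (l.take j0 ++ x :: y :: l.drop (j0 + 2)).take (j0 + 1)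
        = l.take j0 ++ [x] := by
      intro x y
      rw [List.take_append, List.take_of_length_le (by omega), hulen,
        show j0 + 1 - j0 = 1 from by omega, List.take_succ_cons, List.take_zero]
    have hdrop2 : ∀ x y : Int, (l.take j0 ++ x :: y :: l.drop (j0 + 2)).drop (j0 + 1)
        = y :: l.drop (j0 + 2) := by
      intro x y
      rw [List.drop_append, List.drop_eq_nil_of_le (by omega), hulen,
        show j0 + 1 - j0 = 1 from by omega, List.drop_succ_cons, List.drop_zero, List.nil_append]
    by_cases hc : l[j0] > l[j0 + 1]
    · rw [if_pos hc, hcast, hcast2, ih (j0 + 1) _ (by rw [hlen' _ _]; omega),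
        htake _ _, hdrop2 _ _, hdj,
        show bpass (l[j0] :: l[j0 + 1] :: l.drop (j0 + 2)) (m + 1)
          = l[j0 + 1] :: bpass (l[j0] :: l.drop (j0 + 2)) m from by rw [bpass, if_pos hc]]
      simp
    · rw [if_neg hc, hcast, hcast2, ih (j0 + 1) _ (by rw [hlen' _ _]; omega),
        htake _ _, hdrop2 _ _, hdj,
        show bpass (l[j0] :: l[j0 + 1] :: l.drop (j0 + 2)) (m + 1)
          = l[j0] :: bpass (l[j0 + 1] :: l.drop (j0 + 2)) m from by rw [bpass, if_neg hc]]
      try simp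
      try (rw [List.take_succ_eq_append_getElem hj0, List.append_assoc]; rfl)

theorem bubbleInner_eq_bpass (r : List Int) (i : Int) (h0 : 0 ≤ i) (h1 : i < r.length) :
    bubbleInner r i = bpass r ((r.length : Int) - 1 - i).toNat := by
  unfold bubbleInner
  have hif := inner_fold (((r.length : Int) - 1 - i).toNat) 0 r (by omega)
  simp only [Nat.cast_zero, List.take_zero, List.drop_zero, List.nil_append] at hif
  have hm : PySem.List.len r - 1 - i
      = 0 + ((((r.length : Int) - 1 - i).toNat : Nat) : Int) := by
    simp only [PySem.List.len_eq]; omega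
  rw [hm, hif]

theorem bpass_append : ∀ (m : Nat) (u v : List Int), u.length = m + 1 →
    bpass (u ++ v) m = bpass u m ++ v := by
  intro m
  induction m with
  | zero =>
    intro u v h
    match u, h with
    | [a], _ => rfl
  | succ m ih =>
    intro u v h
    match u with
    | [] => simp at h
    | [a] => simp at h
    | a :: b :: t =>
      show bpass (a :: b :: (t ++ v)) (m + 1) = bpass (a :: b :: t) (m + 1) ++ v
      rw [bpass, bpass]
      split_ifs with hc
      · rw [show a :: (t ++ v) = (a :: t) ++ v from rfl, ih (a :: t) v (by simp at h ⊢; omega)]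
        rfl
      · rw [show b :: (t ++ v) = (b :: t) ++ v from rfl, ih (b :: t) v (by simp at h ⊢; omega)]
        rfl

theorem bpass_full : ∀ (u : List Int), u ≠ [] →
    ∃ w x, bpass u (u.length - 1) = w ++ [x] ∧ (w ++ [x]).Perm u ∧ ∀ y ∈ w, y ≤ x := by
  have key : ∀ (n : Nat) (u : List Int), u.length ≤ n → u ≠ [] →
      ∃ w x, bpass u (u.length - 1) = w ++ [x] ∧ (w ++ [x]).Perm u ∧ ∀ y ∈ w, y ≤ x := by
    intro n
    induction n with
    | zero =>
      intro u h hne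
      rw [Nat.le_zero, List.length_eq_zero_iff] at h
      exact absurd h hne
    | succ n ih =>
      intro u h hne
      match u with
      | [] => exact absurd rfl hne
      | [a] => exact ⟨[], a, rfl, List.Perm.refl _, by simp⟩
      | a :: b :: t =>
        simp only [List.length_cons]
        rw [show t.length + 1 + 1 - 1 = t.length + 1 from by omega, bpass]
        split_ifs with hc
        · obtain ⟨w, x, h1, h2, h3⟩ := ih (a :: t) (by simp at h ⊢; omega) (by simp)
          rw [show (a :: t).length - 1 = t.length from by simp] at h1
          refine ⟨b :: w, x, by rw [h1]; rfl, ?_, ?_⟩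
          · exact (List.Perm.cons b h2).trans (List.Perm.swap a b t)
          · intro y hy
            rcases List.mem_cons.mp hy with rfl | hy
            · rcases List.mem_append.mp (h2.mem_iff.mpr List.mem_cons_self) with ha | ha
              · exact le_trans (le_of_lt hc) (h3 a ha)
              · have : a = x := by simpa using ha
                omega
            · exact h3 y hy
        · obtain ⟨w, x, h1, h2, h3⟩ := ih (b :: t) (by simp at h ⊢; omega) (by simp)
          rw [show (b :: t).length - 1 = t.length from by simp] at h1
          refine ⟨a :: w, x, by rw [h1]; rfl, List.Perm.cons a h2, ?_⟩
          intro y hy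
          rcases List.mem_cons.mp hy with rfl | hy
          · rcases List.mem_append.mp (h2.mem_iff.mpr List.mem_cons_self) with hb | hb
            · exact le_trans (le_of_not_gt hc) (h3 b hb)
            · have : b = x := by simpa using hb
              omega
          · exact h3 y hy
  exact fun u => key u.length u (le_refl _)

theorem outer_inv (r : List Int) : ∀ (k : Nat), k ≤ r.length →
    ((PySem.List.pyRange 0 (k : Int) 1).foldl bubbleInner r).Perm r ∧
    ((PySem.List.pyRange 0 (k : Int) 1).foldl bubbleInner r).length = r.length ∧
    (((PySem.List.pyRange 0 (k : Int) 1).foldl bubbleInner r).drop (r.length - k)).Pairwise (· ≤ ·) ∧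
    (∀ x ∈ ((PySem.List.pyRange 0 (k : Int) 1).foldl bubbleInner r).take (r.length - k),
     ∀ y ∈ ((PySem.List.pyRange 0 (k : Int) 1).foldl bubbleInner r).drop (r.length - k), x ≤ y) := by
  intro k
  induction k with
  | zero =>
    intro _
    rw [Nat.cast_zero, PySem.List.pyRange_one_eq_nil (le_refl _), List.foldl_nil, Nat.sub_zero,
      List.drop_length]
    exact ⟨List.Perm.refl _, rfl, List.Pairwise.nil, by simp⟩
  | succ k ih =>
    intro hk1
    obtain ⟨ip, il, is, ib⟩ := ih (by omega)
    set s := (PySem.List.pyRange 0 (k : Int) 1).foldl bubbleInner r with hs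
    have hk : k < r.length := by omega
    have hrange : PySem.List.pyRange 0 ((k + 1 : Nat) : Int) 1
        = PySem.List.pyRange 0 (k : Int) 1 ++ [(k : Int)] := by
      rw [show ((k + 1 : Nat) : Int) = (k : Int) + 1 from by push_cast; ring]
      exact PySem.List.pyRange_one_succ_right (by positivity)
    rw [hrange, List.foldl_append, List.foldl_cons, List.foldl_nil, ← hs]
    have hbp : bubbleInner s (k : Int) = bpass s ((s.length : Int) - 1 - (k : Int)).toNat := by
      exact bubbleInner_eq_bpass s k (by positivity) (by omega)
    have hm : ((s.length : Int) - 1 - (k : Int)).toNat = r.length - 1 - k := by omega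
    rw [hbp, hm]
    set u := s.take (r.length - k) with hu
    set v := s.drop (r.length - k) with hv
    have hul : u.length = r.length - k := by
      rw [hu, List.length_take]; omega
    have hsplit : s = u ++ v := (List.take_append_drop _ s).symm
    have hbp2 : bpass s (r.length - 1 - k) = bpass u (r.length - 1 - k) ++ v := by
      rw [hsplit, bpass_append _ u v (by omega)]
    have hfull := bpass_full u (by
      intro hnil
      rw [hnil] at hul
      simp at hul
      omega)
    rw [show u.length - 1 = r.length - 1 - k from by omega] at hfull
    obtain ⟨w, x, h1, h2, h3⟩ := hfull
    have hwl : w.length = r.length - (k + 1) := by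
      have := h2.length_eq
      simp at this
      omega
    rw [hbp2, h1]
    have hassoc : (w ++ [x]) ++ v = w ++ (x :: v) := by simp
    have hdropeq : ((w ++ [x]) ++ v).drop (r.length - (k + 1)) = x :: v := by
      rw [hassoc, ← hwl, List.drop_left]
    have htakeeq : ((w ++ [x]) ++ v).take (r.length - (k + 1)) = w := by
      rw [hassoc, ← hwl, List.take_left]
    have hmemu : ∀ z, z ∈ w ++ [x] → z ∈ u := fun z hz => h2.mem_iff.mp hz
    have hperm : ((w ++ [x]) ++ v).Perm r := ((h2.append_right v).trans (by rw [← hsplit])).trans ip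
    refine ⟨hperm, hperm.length_eq.trans rfl, ?_, ?_⟩
    · rw [hdropeq]
      refine List.pairwise_cons.mpr ⟨?_, is⟩
      intro y hy
      exact ib x (hmemu x (by simp)) y hy
    · intro y hy z hz
      rw [htakeeq] at hy
      rw [hdropeq] at hz
      rcases List.mem_cons.mp hz with rfl | hz
      · exact h3 y hy
      · exact ib y (hmemu y (by simp [hy])) z hz

theorem bubble_sorts (r : List Int) :
    ((PySem.List.pyRange 0 (PySem.List.len r) 1).foldl bubbleInner r).Perm r ∧
    ((PySem.List.pyRange 0 (PySem.List.len r) 1).foldl bubbleInner r).Pairwise (· ≤ ·) := by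
  obtain ⟨p1, _, p3, _⟩ := outer_inv r r.length (le_refl _)
  rw [PySem.List.len_eq]
  rw [Nat.sub_self, List.drop_zero] at p3
  exact ⟨p1, p3⟩

-- ---------- A side: the dedup while-loop ----------
theorem dedupLoop_spec : ∀ (r : List Int) (i : Nat), r.Pairwise (· ≤ ·) →
    (r.take (i + 1)).Pairwise (· < ·) →
    (dedupLoop r i).Pairwise (· < ·) ∧ ∀ x, (x ∈ dedupLoop r i ↔ x ∈ r) := by
  intro r i
  induction r, i using dedupLoop.induct with
  | case1 r i h heq ih =>
    intro hle hlt
    have hc := h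
    rw [PySem.List.len_eq] at h
    have hi1 : i + 1 < r.length := by omega
    have hi : i < r.length := by omega
    have hget : r[i] = r[i + 1] := by
      rwa [PySem.List.pyGetD_natCast, List.getD_eq_getElem r 0 hi,
        show (i : Int) + 1 = ((i + 1 : Nat) : Int) from by push_cast; ring,
        PySem.List.pyGetD_natCast, List.getD_eq_getElem r 0 hi1] at heq
    rw [dedupLoop, dif_pos hc, if_pos heq]
    have herase : r.eraseIdx (i + 1) = r.take (i + 1) ++ r.drop (i + 2) :=
      List.eraseIdx_eq_take_drop_succ r (i + 1)
    have htl : (r.take (i + 1)).length = i + 1 := by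
      rw [List.length_take]; omega
    have htake' : (r.eraseIdx (i + 1)).take (i + 1) = r.take (i + 1) := by
      rw [herase, List.take_append, htl, Nat.sub_self, List.take_zero, List.append_nil,
        List.take_take, min_self]
    obtain ⟨p1, p2⟩ := ih (hle.sublist (List.eraseIdx_sublist r (i + 1)))
      (by rw [htake']; exact hlt)
    refine ⟨p1, fun x => (p2 x).trans ?_⟩
    have hrsplit : r = r.take (i + 1) ++ r[i + 1] :: r.drop (i + 2) := by
      rw [← List.drop_eq_getElem_cons hi1, List.take_append_drop]
    have hmem : r[i] ∈ r.take (i + 1) := by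
      rw [List.take_succ_eq_append_getElem hi]
      exact List.mem_append_right _ (List.mem_singleton_self _)
    constructor
    · intro hx
      rw [herase] at hx
      rw [hrsplit]
      rcases List.mem_append.mp hx with hx | hx
      · exact List.mem_append.mpr (Or.inl hx)
      · exact List.mem_append.mpr (Or.inr (List.mem_cons_of_mem _ hx))
    · intro hx
      rw [hrsplit] at hx
      rw [herase]
      rcases List.mem_append.mp hx with hx | hx
      · exact List.mem_append.mpr (Or.inl hx)
      · rcases List.mem_cons.mp hx with rfl | hx
        · exact List.mem_append.mpr (Or.inl (by rwa [← hget]))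
        · exact List.mem_append.mpr (Or.inr hx)
  | case2 r i h hne ih =>
    intro hle hlt
    have hc := h
    rw [PySem.List.len_eq] at h
    have hi1 : i + 1 < r.length := by omega
    have hi : i < r.length := by omega
    have hget : r[i] ≠ r[i + 1] := by
      rwa [PySem.List.pyGetD_natCast, List.getD_eq_getElem r 0 hi,
        show (i : Int) + 1 = ((i + 1 : Nat) : Int) from by push_cast; ring,
        PySem.List.pyGetD_natCast, List.getD_eq_getElem r 0 hi1] at hne
    rw [dedupLoop, dif_pos hc, if_neg hne]
    apply ih hle
    have hlt2 : r[i] < r[i + 1] :=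
      lt_of_le_of_ne (List.pairwise_iff_getElem.mp hle i (i + 1) hi hi1 (by omega)) hget
    have hmono : ∀ y ∈ r.take (i + 1), y ≤ r[i] := by
      intro y hy
      obtain ⟨j, hj, hyj⟩ := List.mem_iff_getElem.mp hy
      rw [List.length_take] at hj
      have hjr : j < r.length := by omega
      rw [List.getElem_take] at hyj
      subst hyj
      rcases Nat.lt_or_ge j i with hji | hji
      · exact List.pairwise_iff_getElem.mp hle j i hjr hi hji
      · have : j = i := by omega
        subst this
        exact le_refl _
    rw [List.take_succ_eq_append_getElem hi1]
    refine List.pairwise_append.mpr ⟨hlt, by simp, ?_⟩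
    intro y hy z hz
    rcases List.mem_singleton.mp hz with rfl
    exact lt_of_le_of_lt (hmono y hy) hlt2
  | case3 r i h =>
    intro hle hlt
    rw [dedupLoop, dif_neg (by simpa [PySem.List.len_eq] using h)]
    rw [PySem.List.len_eq] at h
    rw [List.take_of_length_le (by omega)] at hlt
    exact ⟨hlt, fun x => Iff.rfl⟩

-- ---------- A's characterization ----------
theorem take_one_pairwise (l : List Int) : (l.take 1).Pairwise (· < ·) := by
  cases l <;> simp

theorem a_spec (arr : List Int) :
    (get_sorted_unique_even_numbers arr).Pairwise (· < ·) ∧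
    (∀ x, x ∈ get_sorted_unique_even_numbers arr ↔ x ∈ arr.filter evenp) := by
  unfold get_sorted_unique_even_numbers
  by_cases harr : PySem.List.len arr = 0
  · rw [if_pos harr]
    rw [PySem.List.len_eq] at harr
    have : arr = [] := by
      rw [← List.length_eq_zero_iff]
      exact_mod_cast harr
    subst this
    simp
  · rw [if_neg harr]
    dsimp only
    have hcount : arr.foldl (fun c num => if PySem.Int.mod num 2 = 0 then c + 1 else c) (0 : Int)
        = ((arr.filter evenp).length : Int) := by
      have hfe : (fun (c : Int) num => if PySem.Int.mod num 2 = 0 then c + 1 else c)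
          = (fun (c : Int) num => if evenp num = true then c + 1 else c) := by
        funext c num
        simp [evenp]
      rw [hfe, PySem.List.foldl_count_if evenp arr 0, List.countP_eq_length_filter, zero_add]
    have hrepl : (List.replicate (arr.foldl
        (fun c num => if PySem.Int.mod num 2 = 0 then c + 1 else c) (0 : Int)).toNat
        (0 : Int)).length = (arr.filter evenp).length := by
      rw [List.length_replicate, hcount, Int.toNat_natCast]
    have hfill := fill_spec arr [] _ hrepl
    simp only [List.nil_append, List.length_nil, Nat.cast_zero] at hfill
    rw [hfill]
    obtain ⟨hperm, hpair⟩ := bubble_sorts (arr.filter evenp)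
    obtain ⟨q1, q2⟩ := dedupLoop_spec _ 0 hpair (take_one_pairwise _)
    exact ⟨q1, fun x => (q2 x).trans (hperm.mem_iff)⟩

-- ===== VERDICT (by name: the statement is the Claim_ definition above) =====
theorem get_sorted_unique_even_numbers_spec : Claim_equal_get_sorted_unique_even_numbers := by
  intro arr _
  unfold Spec_get_sorted_unique_even_numbers
  obtain ⟨hA1, hA2⟩ := a_spec arr
  obtain ⟨hB1, hB2⟩ := alt_spec arr
  exact strictSorted_eq _ _ hA1 hB1 (fun x => (hA2 x).trans (hB2 x).symm)
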